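-- pv_equiv track=rewrite | github.com/Shridhar278/CP-Problems-Archive | Other_Coding_Contests/01_IICPC_Quantfest_2025/D.py | givebinarygaps
-- ===== SOURCE A (Python) =====
-- def givebinarygaps(n):
--     gap = []
--     count = 0
--     top = 0
--     while n >= 1:
--         if n % 2 == 1:
--             gap.append(count)
--             count = 0
--         else:
--             count += 1
--         n = n // 2
--         top += 1
--     return gap, top
-- ===== SOURCE B (Python) =====
-- def givebinarygaps(n):
--     # Pass 1: record only the positions of set bits and the bit count.
--     positions = []
--     top = 0
--     m = n
--     while m >= 1:
--         if m % 2 == 1: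
--             positions.append(top)
--         m = m // 2
--         top += 1
--     # Pass 2: gaps are differences of consecutive set-bit positions.
--     gap = []
--     prev = -1
--     for p in positions:
--         gap.append(p - prev - 1)
--         prev = p
--     return gap, top
-- ===== Notes on version B (the rewrite author's own statement) =====
-- stated objective: alternative
-- what changed: A interleaves a running zero-counter with the bit scan; B first collects the set-bit positions and the bit count, then derives each gap in a second pass as the difference of consecutive positions.
import Mathlib
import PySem

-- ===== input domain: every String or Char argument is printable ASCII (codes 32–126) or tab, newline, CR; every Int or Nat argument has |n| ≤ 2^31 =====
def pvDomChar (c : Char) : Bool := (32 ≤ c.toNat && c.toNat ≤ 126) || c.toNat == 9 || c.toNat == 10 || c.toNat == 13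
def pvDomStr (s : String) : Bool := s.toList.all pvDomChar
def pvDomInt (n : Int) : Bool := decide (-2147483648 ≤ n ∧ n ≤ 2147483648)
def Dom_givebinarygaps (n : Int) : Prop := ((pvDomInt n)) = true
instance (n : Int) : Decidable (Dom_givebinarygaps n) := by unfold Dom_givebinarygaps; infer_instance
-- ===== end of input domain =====

-- B replaces A's interleaved zero-counter with two passes: collect set-bit positions, then take consecutive differences (alternative decomposition, same cost).


-- ===== PORT A =====
-- A's while loop: gap/count/top state, n halved each step.
def gbgLoopA (m : Int) (gap : List Int) (count top : Int) : List Int × Int :=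
  if h : m ≥ 1 then
    if PySem.Int.mod m 2 = 1 then
      gbgLoopA (PySem.Int.floordiv m 2) (gap ++ [count]) 0 (top + 1)
    else
      gbgLoopA (PySem.Int.floordiv m 2) gap (count + 1) (top + 1)
  else (gap, top)
termination_by m.toNat
decreasing_by
  all_goals
    rw [PySem.Int.floordiv_eq_ediv_of_pos (by omega)]
    omega

def givebinarygaps (n : Int) : List Int × Int := gbgLoopA n [] 0 0

-- ===== PORT B =====
-- B pass 1: positions of set bits and total bit count.
def gbgPos (m : Int) (positions : List Int) (top : Int) : List Int × Int :=
  if h : m ≥ 1 then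
    gbgPos (PySem.Int.floordiv m 2)
      (if PySem.Int.mod m 2 = 1 then positions ++ [top] else positions) (top + 1)
  else (positions, top)
termination_by m.toNat
decreasing_by
  rw [PySem.Int.floordiv_eq_ediv_of_pos (by omega)]
  omega

-- B pass 2: gaps as differences of consecutive positions.
def gbgDiff (ps : List Int) (gap : List Int) (prev : Int) : List Int :=
  match ps with
  | [] => gap
  | p :: rest => gbgDiff rest (gap ++ [p - prev - 1]) p

def givebinarygaps_alt (n : Int) : List Int × Int :=
  let pt := gbgPos n [] 0
  (gbgDiff pt.1 [] (-1), pt.2)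

-- ===== PRECONDITION & SPEC =====
def Spec_givebinarygaps (n : Int) (out : List Int × Int) : Prop := out = givebinarygaps_alt n
instance (n : Int) (out : List Int × Int) : Decidable (Spec_givebinarygaps n out) := by unfold Spec_givebinarygaps; infer_instance

-- ===== CLAIM (what is proved, stated in full; the proofs are below) =====
def Claim_equal_givebinarygaps : Prop := ∀ (n : Int), Dom_givebinarygaps n → Spec_givebinarygaps n (givebinarygaps n)

-- ===== LEMMAS AND PROOFS =====

theorem gbgPos_append (k : Nat) : ∀ (m : Int), m.toNat ≤ k → ∀ (pos : List Int) (top : Int),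
    gbgPos m pos top = (pos ++ (gbgPos m [] top).1, (gbgPos m [] top).2) := by
  induction k with
  | zero =>
    intro m hm pos top
    have h1 : ¬ m ≥ 1 := by omega
    rw [gbgPos]
    conv_rhs => rw [gbgPos]
    simp [h1]
  | succ k ih =>
    intro m hm pos top
    by_cases h : m ≥ 1
    · have hlt : (PySem.Int.floordiv m 2).toNat ≤ k := by
        rw [PySem.Int.floordiv_eq_ediv_of_pos (by omega)]; omega
      rw [gbgPos]
      conv_rhs => rw [gbgPos]
      simp only [h, dite_true, List.nil_append]
      rw [ih _ hlt, ih _ hlt (if PySem.Int.mod m 2 = 1 then [top] else [])]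
      split_ifs <;> simp
    · rw [gbgPos]
      conv_rhs => rw [gbgPos]
      simp [h]

theorem gbgDiff_cons (p : Int) (rest gap : List Int) (prev : Int) :
    gbgDiff (p :: rest) gap prev = gbgDiff rest (gap ++ [p - prev - 1]) p := rfl

theorem gbgDiff_append (ps : List Int) : ∀ (gap : List Int) (prev : Int),
    gbgDiff ps gap prev = gap ++ gbgDiff ps [] prev := by
  induction ps with
  | nil => intro gap prev; simp [gbgDiff]
  | cons p rest ih =>
    intro gap prev
    rw [gbgDiff]
    conv_rhs => rw [gbgDiff]
    rw [ih, ih ([] ++ [p - prev - 1])]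
    simp

theorem gbgMain (k : Nat) : ∀ (m : Int), m.toNat ≤ k → ∀ (gap : List Int) (count top : Int),
    gbgLoopA m gap count top =
      (gap ++ gbgDiff (gbgPos m [] top).1 [] (top - count - 1), (gbgPos m [] top).2) := by
  induction k with
  | zero =>
    intro m hm gap count top
    have h1 : ¬ m ≥ 1 := by omega
    rw [gbgLoopA]
    conv_rhs => rw [gbgPos]
    simp [h1, gbgDiff]
  | succ k ih =>
    intro m hm gap count top
    by_cases h : m ≥ 1
    · have hlt : (PySem.Int.floordiv m 2).toNat ≤ k := by
        rw [PySem.Int.floordiv_eq_ediv_of_pos (by omega)]; omega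
      rw [gbgLoopA]
      conv_rhs => rw [gbgPos]
      simp only [h, dite_true]
      by_cases ho : PySem.Int.mod m 2 = 1
      · simp only [ho, if_true, List.nil_append]
        rw [ih _ hlt, gbgPos_append k _ hlt [top] (top + 1)]
        simp only [List.nil_append, List.cons_append]
        rw [gbgDiff_cons]
        have e2 : top - (top - count - 1) - 1 = count := by ring
        simp only [List.nil_append, e2]
        rw [gbgDiff_append _ [count] top]
        have e1 : top + 1 - 0 - 1 = top := by ring
        rw [e1]
        simp [List.append_assoc]
      · simp only [ho, if_false]
        rw [ih _ hlt]
        have e1 : top + 1 - (count + 1) - 1 = top - count - 1 := by ring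
        rw [e1]
    · rw [gbgLoopA]
      conv_rhs => rw [gbgPos]
      simp [h, gbgDiff]

-- ===== VERDICT (by name: the statement is the Claim_ definition above) =====
theorem givebinarygaps_spec : Claim_equal_givebinarygaps := by
  intro n _
  unfold Spec_givebinarygaps givebinarygaps givebinarygaps_alt
  rw [gbgMain n.toNat n le_rfl]
  simp
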